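-- pv_equiv track=rewrite | github.com/PrekinII/Recipes | Cook_book.py | cook_book_dict
-- ===== SOURCE A (Python) =====
-- def cook_book_dict(dishs, quantity_ingredients, ing_list):  # Создаем кулинарную книгу
--     cook_list = []
--     cook_book_ = {}
--     for i in quantity_ingredients:
--         y = ing_list[:i:]
--         del ing_list[:i:]
--         cook_list.append(y)
--         cook_book_ = dict(zip(dishs, cook_list))
--     return cook_book_
-- ===== SOURCE B (Python) =====
-- def cook_book_dict(dishs, quantity_ingredients, ing_list):
--     # Pair each dish with its quantity and peel that many ingredients off the
--     # front of the (immutably shrinking) rest list, inserting straight into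
--     # the dict.  Does not mutate ing_list (the original consumes it in place;
--     # the return value is the same).
--     cook_book_ = {}
--     rest = ing_list
--     for dish, q in zip(dishs, quantity_ingredients):
--         cook_book_[dish] = rest[:q]
--         rest = rest[q:]
--     return cook_book_
-- ===== Notes on version B (the rewrite author's own statement) =====
-- stated objective: faster
-- what changed: Replaces per-iteration dict(zip(...)) rebuilds, the cook_list accumulator and in-place front-deletion of ing_list with a single zip-driven pass that peels chunks off an immutable rest list and inserts them directly into the dict.
import Mathlib
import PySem

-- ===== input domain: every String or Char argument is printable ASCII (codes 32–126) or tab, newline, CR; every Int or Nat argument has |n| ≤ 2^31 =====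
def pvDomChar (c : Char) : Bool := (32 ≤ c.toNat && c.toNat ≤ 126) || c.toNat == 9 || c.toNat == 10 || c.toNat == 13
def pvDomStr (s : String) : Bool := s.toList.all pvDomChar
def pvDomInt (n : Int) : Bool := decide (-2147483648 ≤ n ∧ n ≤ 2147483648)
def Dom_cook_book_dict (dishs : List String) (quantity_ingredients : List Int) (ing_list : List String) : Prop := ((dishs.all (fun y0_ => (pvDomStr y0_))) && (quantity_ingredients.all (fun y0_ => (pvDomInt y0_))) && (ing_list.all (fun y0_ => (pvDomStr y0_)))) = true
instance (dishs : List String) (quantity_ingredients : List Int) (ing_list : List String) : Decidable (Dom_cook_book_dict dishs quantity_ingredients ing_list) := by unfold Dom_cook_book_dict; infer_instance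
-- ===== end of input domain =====

-- B replaces A's per-iteration dict(zip(...)) rebuild and cook_list with one zip-driven pass
-- peeling chunks off a rest list (objective: faster). A consumes ing_list in place, B does
-- not: the equivalence proved is about the RETURN value only.

-- ===== PORT A =====
-- dict(zip(dishs, cook_list)): successive inserts (last value wins, first position kept)
def pvDictZip (dishs : List String) (cl : List (List String)) : PySem.Dict String (List String) :=
  (dishs.zip cl).foldl (fun d p => d.insert p.1 p.2) PySem.Dict.empty

def cook_book_dict (dishs : List String) (quantity_ingredients : List Int) (ing_list : List String) : List (String × List String) :=
  let st := quantity_ingredients.foldl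
    (fun (st : List (List String) × PySem.Dict String (List String) × List String) i =>
      let y := PySem.List.slice st.2.2 none (some i)          -- y = ing_list[:i:]
      let ing' := PySem.List.slice st.2.2 (some i) none       -- del ing_list[:i:] keeps ing_list[i:]
      let cl := st.1 ++ [y]                                   -- cook_list.append(y)
      (cl, pvDictZip dishs cl, ing'))                         -- cook_book_ = dict(zip(dishs, cook_list))
    ([], PySem.Dict.empty, ing_list)
  st.2.1.items

-- ===== PORT B =====
-- Source B's loop: for dish, q in zip(dishs, quantity_ingredients): insert rest[:q]; rest = rest[q:]
def cook_book_dict_alt (dishs : List String) (quantity_ingredients : List Int) (ing_list : List String) : List (String × List String) :=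
  ((dishs.zip quantity_ingredients).foldl
    (fun (st : PySem.Dict String (List String) × List String) p =>
      (st.1.insert p.1 (PySem.List.slice st.2 none (some p.2)), PySem.List.slice st.2 (some p.2) none))
    (PySem.Dict.empty, ing_list)).1.items

-- ===== PRECONDITION & SPEC =====
def Spec_cook_book_dict (dishs : List String) (quantity_ingredients : List Int) (ing_list : List String) (out : List (String × List String)) : Prop := out = cook_book_dict_alt dishs quantity_ingredients ing_list
instance (dishs : List String) (quantity_ingredients : List Int) (ing_list : List String) (out : List (String × List String)) : Decidable (Spec_cook_book_dict dishs quantity_ingredients ing_list out) := by unfold Spec_cook_book_dict; infer_instance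

-- ===== CLAIM (what is proved, stated in full; the proofs are below) =====
def Claim_equal_cook_book_dict : Prop := ∀ (dishs : List String) (quantity_ingredients : List Int) (ing_list : List String), Dom_cook_book_dict dishs quantity_ingredients ing_list → Spec_cook_book_dict dishs quantity_ingredients ing_list (cook_book_dict dishs quantity_ingredients ing_list)

-- ===== LEMMAS AND PROOFS =====

-- the successive slices A cuts off the shrinking rest list
def pvChunks : List String → List Int → List (List String)
  | _, [] => []
  | rest, q :: qs => PySem.List.slice rest none (some q) :: pvChunks (PySem.List.slice rest (some q) none) qs

-- A's fold, started from a state of the invariant shape, yields dict(zip(dishs, cl ++ chunks))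
theorem pv_mainA (dishs : List String) (qs : List Int) (cl : List (List String)) (rest : List String) :
    (qs.foldl
      (fun (st : List (List String) × PySem.Dict String (List String) × List String) i =>
        let y := PySem.List.slice st.2.2 none (some i)
        let ing' := PySem.List.slice st.2.2 (some i) none
        let cl := st.1 ++ [y]
        (cl, pvDictZip dishs cl, ing'))
      (cl, pvDictZip dishs cl, rest)).2.1 =
    pvDictZip dishs (cl ++ pvChunks rest qs) := by
  induction qs generalizing cl rest with
  | nil => simp [pvChunks]
  | cons q rest' ih =>
    simp only [List.foldl_cons, pvChunks]
    exact (ih (cl ++ [PySem.List.slice rest none (some q)]) (PySem.List.slice rest (some q) none)).trans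
      (congrArg (pvDictZip dishs) (by simp))

-- B's fold from any book and rest equals folding the inserts of zip(dishs, chunks) into book
theorem pv_mainB (dishs : List String) (qs : List Int) (rest : List String)
    (book : PySem.Dict String (List String)) :
    ((dishs.zip qs).foldl
      (fun (st : PySem.Dict String (List String) × List String) p =>
        (st.1.insert p.1 (PySem.List.slice st.2 none (some p.2)), PySem.List.slice st.2 (some p.2) none))
      (book, rest)).1 =
    (dishs.zip (pvChunks rest qs)).foldl (fun d p => d.insert p.1 p.2) book := by
  induction dishs generalizing qs rest book with
  | nil => simp
  | cons d ds ih =>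
    cases qs with
    | nil => simp [pvChunks]
    | cons q qs' =>
      simp only [pvChunks, List.zip_cons_cons, List.foldl_cons]
      exact ih qs' (PySem.List.slice rest (some q) none) _

-- ===== VERDICT (by name: the statement is the Claim_ definition above) =====
theorem cook_book_dict_spec : Claim_equal_cook_book_dict := by
  intro dishs qs ing _
  show cook_book_dict dishs qs ing = cook_book_dict_alt dishs qs ing
  have h0 : pvDictZip dishs ([] : List (List String)) = PySem.Dict.empty := by simp [pvDictZip]
  have hA := pv_mainA dishs qs [] ing
  rw [h0] at hA
  simp only [List.nil_append] at hA
  have hA' : cook_book_dict dishs qs ing = (pvDictZip dishs (pvChunks ing qs)).items :=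
    congrArg PySem.Dict.items hA
  have hB' : cook_book_dict_alt dishs qs ing = (pvDictZip dishs (pvChunks ing qs)).items :=
    congrArg PySem.Dict.items (pv_mainB dishs qs ing PySem.Dict.empty)
  exact hA'.trans hB'.symm
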